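-- pv_equiv track=rewrite | github.com/yuna1212/algorithm | 백준/카카오 코드 페스티벌 2018 예선/상금 헌터.py | first_competition
-- ===== SOURCE A (Python) =====
-- def first_competition(rank):
--     if rank == 0:
--         return 0
--     prized_people = [1, 2, 3, 4, 5, 6]
--     prize = [500, 300, 200, 50, 30, 10]
--     for i in range(len(prized_people)):
--         if rank <= sum(prized_people[:i+1]):
--             return prize[i]
--     return 0
-- ===== SOURCE B (Python) =====
-- def _bisect_left(a, x):
--     lo, hi = 0, len(a)
--     while lo < hi:
--         mid = (lo + hi) // 2
--         if a[mid] < x: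
--             lo = mid + 1
--         else:
--             hi = mid
--     return lo
--
-- def first_competition(rank):
--     if rank == 0:
--         return 0
--     cum = [1, 3, 6, 10, 15, 21]
--     prize = [500, 300, 200, 50, 30, 10]
--     i = _bisect_left(cum, rank)
--     return prize[i] if i < len(prize) else 0
-- ===== Notes on version B (the rewrite author's own statement) =====
-- stated objective: idiomatic
-- what changed: Replaces the linear scan that re-sums a prefix at every step with precomputed cumulative thresholds and a binary search (bisect_left) into them.
import Mathlib
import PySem

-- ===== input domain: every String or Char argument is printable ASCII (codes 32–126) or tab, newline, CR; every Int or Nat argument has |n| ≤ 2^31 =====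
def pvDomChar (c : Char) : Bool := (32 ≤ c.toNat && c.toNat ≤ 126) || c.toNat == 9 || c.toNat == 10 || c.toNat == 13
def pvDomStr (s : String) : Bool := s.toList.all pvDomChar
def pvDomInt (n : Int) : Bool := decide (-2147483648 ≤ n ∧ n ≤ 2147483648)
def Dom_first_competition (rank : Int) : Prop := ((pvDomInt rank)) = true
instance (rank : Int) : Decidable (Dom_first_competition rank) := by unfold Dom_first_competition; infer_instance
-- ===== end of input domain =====

-- B replaces A's linear scan with re-summed prefixes by precomputed cumulative thresholds and a binary search (idiomatic bisect_left); return value only.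


-- ===== PORT A =====
-- loop over i = 0..5: if rank <= sum(prized_people[:i+1]) return prize[i]
def firstA_loop (rank : Int) (prized prize : List Int) : List Nat → Int
  | [] => 0
  | i :: rest =>
    if rank ≤ ((prized.take (i+1)).sum) then prize.getD i 0
    else firstA_loop rank prized prize rest

def first_competition (rank : Int) : Int :=
  if rank = 0 then 0
  else firstA_loop rank [1, 2, 3, 4, 5, 6] [500, 300, 200, 50, 30, 10] (List.range 6)

-- ===== PORT B =====
-- hand-written bisect_left (binary search for the leftmost index with x ≤ a[i]);
-- Source B's while loop is transcribed with a fuel argument (hi - lo shrinks every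
-- iteration, so fuel = list length always suffices for a 6-element list)
def bisectGo : Nat → List Int → Int → Nat → Nat → Nat
  | 0, _, _, lo, _ => lo
  | fuel + 1, a, x, lo, hi =>
    if lo < hi then
      let mid := (lo + hi) / 2
      if a.getD mid 0 < x then bisectGo fuel a x (mid + 1) hi
      else bisectGo fuel a x lo mid
    else lo

def bisectLeft (a : List Int) (x : Int) : Nat := bisectGo a.length a x 0 a.length

def first_competition_alt (rank : Int) : Int :=
  if rank = 0 then 0
  else
    let cum : List Int := [1, 3, 6, 10, 15, 21]
    let prize : List Int := [500, 300, 200, 50, 30, 10]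
    let i := bisectLeft cum rank
    if i < prize.length then prize.getD i 0 else 0

-- ===== PRECONDITION & SPEC =====
def Spec_first_competition (rank : Int) (out : Int) : Prop := out = first_competition_alt rank
instance (rank : Int) (out : Int) : Decidable (Spec_first_competition rank out) := by unfold Spec_first_competition; infer_instance

-- ===== CLAIM (what is proved, stated in full; the proofs are below) =====
def Claim_equal_first_competition : Prop := ∀ (rank : Int), Dom_first_competition rank → Spec_first_competition rank (first_competition rank)

-- ===== LEMMAS AND PROOFS =====

-- evaluate A's loop on the concrete lists
theorem loopA_eval (x : Int) :
    firstA_loop x [1, 2, 3, 4, 5, 6] [500, 300, 200, 50, 30, 10] [0, 1, 2, 3, 4, 5] =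
      if x ≤ 1 then 500 else if x ≤ 3 then 300 else if x ≤ 6 then 200
      else if x ≤ 10 then 50 else if x ≤ 15 then 30 else if x ≤ 21 then 10 else 0 := by
  simp only [firstA_loop]; norm_num

-- evaluate the binary search on the concrete threshold list
theorem bisect_eval (x : Int) :
    bisectLeft [1, 3, 6, 10, 15, 21] x =
      if x ≤ 1 then 0 else if x ≤ 3 then 1 else if x ≤ 6 then 2
      else if x ≤ 10 then 3 else if x ≤ 15 then 4 else if x ≤ 21 then 5 else 6 := by
  simp only [bisectLeft, bisectGo, List.getD, List.length_cons, List.length_nil]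
  norm_num
  split_ifs <;> omega

-- ===== VERDICT (by name: the statement is the Claim_ definition above) =====
theorem first_competition_spec : Claim_equal_first_competition := by
  intro rank _
  unfold Spec_first_competition first_competition first_competition_alt
  rw [show List.range 6 = [0, 1, 2, 3, 4, 5] from rfl, loopA_eval]
  show _ = if rank = 0 then 0 else
    if bisectLeft [1, 3, 6, 10, 15, 21] rank < ([500, 300, 200, 50, 30, 10] : List Int).length
    then ([500, 300, 200, 50, 30, 10] : List Int).getD (bisectLeft [1, 3, 6, 10, 15, 21] rank) 0
    else 0
  rw [bisect_eval]
  by_cases h0 : rank = 0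
  · rw [if_pos h0, if_pos h0]
  · rw [if_neg h0, if_neg h0]
    by_cases h1 : rank ≤ 1
    · rw [if_pos h1, if_pos h1]; rfl
    · rw [if_neg h1, if_neg h1]
      by_cases h2 : rank ≤ 3
      · rw [if_pos h2, if_pos h2]; rfl
      · rw [if_neg h2, if_neg h2]
        by_cases h3 : rank ≤ 6
        · rw [if_pos h3, if_pos h3]; rfl
        · rw [if_neg h3, if_neg h3]
          by_cases h4 : rank ≤ 10
          · rw [if_pos h4, if_pos h4]; rfl
          · rw [if_neg h4, if_neg h4]
            by_cases h5 : rank ≤ 15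
            · rw [if_pos h5, if_pos h5]; rfl
            · rw [if_neg h5, if_neg h5]
              by_cases h6 : rank ≤ 21
              · rw [if_pos h6, if_pos h6]; rfl
              · rw [if_neg h6, if_neg h6]; rfl
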